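-- pv_equiv track=rewrite | github.com/Gravitar64/A-beautiful-code-in-Python | Teil_xx_bwinf_41_a3.py | mut_blockzeile
-- ===== SOURCE A (Python) =====
-- def mut_blockzeile(s, p):
--   s1 = s.copy()
--   for bze_von, bze_zu in enumerate(p):
--     if bze_von == bze_zu:
--       continue
--     for i in range(27):
--       s1[i % 9 + i // 9 * 9 + bze_zu * 3 * 9] = s[i %
--                                                   9 + i // 9 * 9 + bze_von * 3 * 9]
--   return s1
-- ===== SOURCE B (Python) =====
-- def mut_blockzeile(s, p):
--   idx = list(range(len(s)))
--   for von, zu in enumerate(p):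
--     if von == zu:
--       continue
--     for i in range(27):
--       idx[zu * 27 + i] = von * 27 + i
--   return [s[j] for j in idx]
-- ===== Notes on version B (the rewrite author's own statement) =====
-- stated objective: alternative
-- what changed: B builds an explicit permutation-index table (identity-initialised, destination entries overwritten with source positions) and produces the result in one final gather pass, instead of A's direct scatter of values over a copy of s; it also simplifies A's i%9+i//9*9 index arithmetic to plain i.
import Mathlib
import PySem

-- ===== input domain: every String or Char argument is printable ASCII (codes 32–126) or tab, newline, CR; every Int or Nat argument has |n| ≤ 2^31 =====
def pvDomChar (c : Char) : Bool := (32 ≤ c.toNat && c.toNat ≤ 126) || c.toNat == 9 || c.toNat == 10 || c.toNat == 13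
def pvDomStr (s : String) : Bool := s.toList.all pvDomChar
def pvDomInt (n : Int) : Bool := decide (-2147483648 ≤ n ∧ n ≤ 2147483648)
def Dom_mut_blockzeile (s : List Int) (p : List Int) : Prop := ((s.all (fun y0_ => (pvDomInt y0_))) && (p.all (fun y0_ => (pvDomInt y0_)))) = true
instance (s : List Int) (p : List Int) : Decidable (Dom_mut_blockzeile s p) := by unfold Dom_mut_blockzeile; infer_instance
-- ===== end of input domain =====

-- B replaces A's per-block scatter of values by a permutation-index table that is built once and
-- then used in a single gather pass (objective: alternative decomposition; return value only, neither mutates its input).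

-- ===== PORT A =====
-- port of Source A: s1 = s.copy(); scatter writes s1[i%9 + i//9*9 + zu*27] = s[i%9 + i//9*9 + von*27]
-- (pySetD/pyGetD are the total forms; Pre_ below puts every accessed index in Python range)
def mut_blockzeile (s : List Int) (p : List Int) : List Int :=
  (PySem.List.enumerate p 0).foldl
    (fun s1 vz =>
      if vz.1 = vz.2 then s1
      else
        (PySem.List.pyRange 0 27 1).foldl
          (fun s1 i =>
            PySem.List.pySetD s1
              (PySem.Int.mod i 9 + PySem.Int.floordiv i 9 * 9 + vz.2 * 3 * 9)
              (PySem.List.pyGetD s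
                (PySem.Int.mod i 9 + PySem.Int.floordiv i 9 * 9 + vz.1 * 3 * 9) 0))
          s1)
    s

-- ===== PORT B =====
-- port of Source B: idx = list(range(len(s))); idx[zu*27+i] = von*27+i; gather [s[j] for j in idx]
def mut_blockzeile_alt (s : List Int) (p : List Int) : List Int :=
  ((PySem.List.enumerate p 0).foldl
    (fun idx vz =>
      if vz.1 = vz.2 then idx
      else
        (PySem.List.pyRange 0 27 1).foldl
          (fun idx i => PySem.List.pySetD idx (vz.2 * 27 + i) (vz.1 * 27 + i))
          idx)
    (PySem.List.pyRange 0 (PySem.List.len s) 1)).map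
    (fun j => PySem.List.pyGetD s j 0)

-- ===== PRECONDITION & SPEC =====
-- Pre_: exactly the inputs on which the Python A returns (every read s[von*27+i] and write
-- s1[zu*27+i], i = 0..26, for each von ≠ zu in enumerate(p), is in Python index range,
-- negative wraparound included); outside it A raises IndexError.
def Pre_mut_blockzeile (s : List Int) (p : List Int) : Prop :=
  ∀ k ∈ List.range p.length, (k : Int) ≠ p.getD k 0 →
    PySem.Raise.InRange s.length ((p.getD k 0) * 27) ∧
    PySem.Raise.InRange s.length ((p.getD k 0) * 27 + 26) ∧
    PySem.Raise.InRange s.length ((k : Int) * 27) ∧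
    PySem.Raise.InRange s.length ((k : Int) * 27 + 26)
instance (s : List Int) (p : List Int) : Decidable (Pre_mut_blockzeile s p) := by
  unfold Pre_mut_blockzeile; infer_instance

def pvWitness_mut_blockzeile : List Int × List Int :=
  ([1, 2, 3, 4, 5, 6, 7, 8, 9, 10, 11, 12, 13, 14, 15, 16, 17, 18, 19, 20, 21, 22, 23, 24, 25,
    26, 27, 28, 29, 30, 31, 32, 33, 34, 35, 36, 37, 38, 39, 40, 41, 42, 43, 44, 45, 46, 47, 48,
    49, 50, 51, 52, 53, 54, 55, 56, 57, 58, 59, 60, 61, 62, 63, 64, 65, 66, 67, 68, 69, 70, 71,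
    72, 73, 74, 75, 76, 77, 78, 79, 80, 81], [1, 0, 2])

def Spec_mut_blockzeile (s : List Int) (p : List Int) (out : List Int) : Prop := out = mut_blockzeile_alt s p
instance (s : List Int) (p : List Int) (out : List Int) : Decidable (Spec_mut_blockzeile s p out) := by unfold Spec_mut_blockzeile; infer_instance

-- ===== CLAIM (what is proved, stated in full; the proofs are below) =====
def Claim_equal_mut_blockzeile : Prop := ∀ (s : List Int) (p : List Int), Dom_mut_blockzeile s p → Pre_mut_blockzeile s p → Spec_mut_blockzeile s p (mut_blockzeile s p)

-- ===== LEMMAS AND PROOFS =====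

-- pySetD commutes with map (the resolved index depends only on the length, which map preserves)
theorem map_pySetD {α β : Type} (f : α → β) (xs : List α) (i : Int) (v : α) :
    (PySem.List.pySetD xs i v).map f = PySem.List.pySetD (xs.map f) i (f v) := by
  unfold PySem.List.pySetD PySem.List.pySet?
  cases h : PySem.List.pyIdx? xs.length i with
  | none => simp [h]
  | some k => simp [h, List.map_set]

-- Python's i % 9 + i // 9 * 9 is i, for every integer i
theorem fmod_fdiv_id (i : Int) :
    PySem.Int.mod i 9 + PySem.Int.floordiv i 9 * 9 = i := by
  unfold PySem.Int.mod PySem.Int.floordiv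
  have := Int.fmod_add_mul_fdiv i 9
  omega

-- gathering through the identity index table returns s
theorem map_pyGetD_range (s : List Int) :
    (PySem.List.pyRange 0 (PySem.List.len s) 1).map (fun j => PySem.List.pyGetD s j 0) = s := by
  simp only [PySem.List.len_eq, PySem.List.pyRange_zero_natCast, List.map_map]
  apply List.ext_getElem
  · simp
  · intro k h1 h2
    simp [PySem.List.pyGetD_natCast, List.getD_eq_getElem?_getD, List.getElem?_eq_getElem h2]

-- one inner loop: A's value scatter is the image under the gather map of B's index scatter
theorem inner_loop (s : List Int) (von zu : Int) (L : List Int) (idx : List Int) :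
    L.foldl
      (fun s1 i =>
        PySem.List.pySetD s1
          (PySem.Int.mod i 9 + PySem.Int.floordiv i 9 * 9 + zu * 3 * 9)
          (PySem.List.pyGetD s
            (PySem.Int.mod i 9 + PySem.Int.floordiv i 9 * 9 + von * 3 * 9) 0))
      (idx.map (fun j => PySem.List.pyGetD s j 0)) =
    (L.foldl (fun idx i => PySem.List.pySetD idx (zu * 27 + i) (von * 27 + i)) idx).map
      (fun j => PySem.List.pyGetD s j 0) := by
  induction L generalizing idx with
  | nil => rfl
  | cons i L ih =>
    simp only [List.foldl_cons]
    rw [fmod_fdiv_id, ← ih, map_pySetD]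
    ring_nf

-- the outer loop, tying A's value state to B's index state through the gather map
theorem outer_loop (s : List Int) (E : List (Int × Int)) (idx : List Int) :
    E.foldl
      (fun s1 vz =>
        if vz.1 = vz.2 then s1
        else
          (PySem.List.pyRange 0 27 1).foldl
            (fun s1 i =>
              PySem.List.pySetD s1
                (PySem.Int.mod i 9 + PySem.Int.floordiv i 9 * 9 + vz.2 * 3 * 9)
                (PySem.List.pyGetD s
                  (PySem.Int.mod i 9 + PySem.Int.floordiv i 9 * 9 + vz.1 * 3 * 9) 0))
            s1)
      (idx.map (fun j => PySem.List.pyGetD s j 0)) =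
    (E.foldl
      (fun idx vz =>
        if vz.1 = vz.2 then idx
        else
          (PySem.List.pyRange 0 27 1).foldl
            (fun idx i => PySem.List.pySetD idx (vz.2 * 27 + i) (vz.1 * 27 + i))
            idx)
      idx).map (fun j => PySem.List.pyGetD s j 0) := by
  induction E generalizing idx with
  | nil => rfl
  | cons vz E ih =>
    simp only [List.foldl_cons]
    by_cases h : vz.1 = vz.2
    · rw [if_pos h, if_pos h]; exact ih idx
    · rw [if_neg h, if_neg h, inner_loop]; exact ih _

-- ===== VERDICT (by name: the statement is the Claim_ definition above) =====
theorem mut_blockzeile_spec : Claim_equal_mut_blockzeile := by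
  intro s p _ _
  unfold Spec_mut_blockzeile mut_blockzeile mut_blockzeile_alt
  have h := outer_loop s (PySem.List.enumerate p 0) (PySem.List.pyRange 0 (PySem.List.len s) 1)
  rw [map_pyGetD_range] at h
  exact h
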